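-- pv_equiv track=rewrite | github.com/aporb/LocalTranscribe | localtranscribe/quality/gates.py | _count_speaker_switches
-- ===== SOURCE A (Python) =====
-- from typing import Dict, List, Optional, Any
--
-- def _count_speaker_switches(segments: List[Dict]) -> int:
--     """Count number of speaker switches in segments."""
--     if len(segments) < 2:
--         return 0
--
--     switches = 0
--     for i in range(1, len(segments)):
--         if segments[i].get('speaker') != segments[i-1].get('speaker'):
--             switches += 1
--
--     return switches
-- ===== SOURCE B (Python) =====
-- def _count_speaker_switches(segments):
--     """Count speaker switches by divide and conquer on index ranges:
--     a range of < 2 segments has no switch; otherwise split at the midpoint,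
--     count switches in each half and add 1 if a switch straddles the split."""
--     keys = [s.get('speaker') for s in segments]
--
--     def switches_in(lo, hi):
--         if hi - lo < 2:
--             return 0
--         mid = (lo + hi) // 2
--         boundary = 1 if keys[mid - 1] != keys[mid] else 0
--         return switches_in(lo, mid) + switches_in(mid, hi) + boundary
--
--     return switches_in(0, len(keys))
-- ===== Notes on version B (the rewrite author's own statement) =====
-- stated objective: alternative
-- what changed: Replaces the linear adjacent-pair scan with a divide-and-conquer recursion over index ranges: split at the midpoint, recurse on both halves, and add one switch if the pair straddling the split differs.
import Mathlib
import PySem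

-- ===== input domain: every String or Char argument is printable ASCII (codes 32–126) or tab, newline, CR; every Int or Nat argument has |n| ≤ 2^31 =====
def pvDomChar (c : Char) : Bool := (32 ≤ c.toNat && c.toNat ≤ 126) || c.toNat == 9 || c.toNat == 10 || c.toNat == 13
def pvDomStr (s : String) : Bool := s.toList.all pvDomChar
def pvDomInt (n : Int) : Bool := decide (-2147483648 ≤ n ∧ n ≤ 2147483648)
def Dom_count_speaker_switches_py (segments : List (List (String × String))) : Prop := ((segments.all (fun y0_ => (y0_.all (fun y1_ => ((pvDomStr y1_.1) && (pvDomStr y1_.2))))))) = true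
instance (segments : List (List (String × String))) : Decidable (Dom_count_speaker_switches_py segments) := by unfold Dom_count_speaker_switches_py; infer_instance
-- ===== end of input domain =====

-- B counts switches by divide and conquer over index ranges (recurse on halves, add
-- one if the pair straddling the midpoint differs) instead of A's linear index loop;
-- same O(n) cost, a different decomposition.

-- s.get('speaker') for a segment dict (shared by both ports)
def speakerKey (seg : List (String × String)) : Option String :=
  (PySem.Dict.ofList seg).get? "speaker"

-- ===== PORT A =====
def count_speaker_switches_py (segments : List (List (String × String))) : Int :=
  if segments.length < 2 then 0
  else
    (PySem.List.pyRange 1 (segments.length : Int) 1).foldl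
      (fun switches i =>
        if speakerKey (PySem.List.pyGetD segments i []) ≠
           speakerKey (PySem.List.pyGetD segments (i - 1) []) then switches + 1 else switches)
      0

-- ===== PORT B =====
-- switches_in(lo, hi) of Source B; lo and hi are always nonnegative in-range indices in Source B,
-- so they are carried as Nat and keys[mid-1]/keys[mid] are the in-range List.getD accesses
-- ((lo+hi)//2 on nonnegative ints is Nat division).
def switchesIn (keys : List (Option String)) (lo hi : Nat) : Int :=
  if hi - lo < 2 then 0
  else
    let mid := (lo + hi) / 2
    switchesIn keys lo mid + switchesIn keys mid hi +
      (if keys.getD (mid - 1) none ≠ keys.getD mid none then 1 else 0)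
termination_by hi - lo
decreasing_by all_goals omega

def count_speaker_switches_py_alt (segments : List (List (String × String))) : Int :=
  let keys := segments.map speakerKey
  switchesIn keys 0 keys.length

-- ===== PRECONDITION & SPEC =====
def Spec_count_speaker_switches_py (segments : List (List (String × String))) (out : Int) : Prop := out = count_speaker_switches_py_alt segments
instance (segments : List (List (String × String))) (out : Int) : Decidable (Spec_count_speaker_switches_py segments out) := by unfold Spec_count_speaker_switches_py; infer_instance

-- ===== CLAIM (what is proved, stated in full; the proofs are below) =====
def Claim_equal_count_speaker_switches_py : Prop := ∀ (segments : List (List (String × String))), Dom_count_speaker_switches_py segments → Spec_count_speaker_switches_py segments (count_speaker_switches_py segments)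

-- ===== LEMMAS AND PROOFS =====

-- boundary indicator: 1 iff the keys at i-1 and i differ
def bd (keys : List (Option String)) (i : Nat) : Int :=
  if keys.getD (i - 1) none ≠ keys.getD i none then 1 else 0

theorem switchesIn_eq_sum (keys : List (Option String)) :
    ∀ (n lo hi : Nat), hi - lo ≤ n →
      switchesIn keys lo hi = ∑ i ∈ Finset.Ico (lo + 1) hi, bd keys i := by
  intro n
  induction n with
  | zero =>
    intro lo hi h
    rw [switchesIn, if_pos (by omega), Finset.Ico_eq_empty (by omega), Finset.sum_empty]
  | succ n ih =>
    intro lo hi h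
    rw [switchesIn]
    by_cases hs : hi - lo < 2
    · rw [if_pos hs, Finset.Ico_eq_empty (by omega), Finset.sum_empty]
    · rw [if_neg hs]
      set mid := (lo + hi) / 2 with hmid
      have h1 : lo + 1 ≤ mid := by omega
      have h2 : mid < hi := by omega
      show switchesIn keys lo mid + switchesIn keys mid hi +
          (if keys.getD (mid - 1) none ≠ keys.getD mid none then 1 else 0)
        = ∑ i ∈ Finset.Ico (lo + 1) hi, bd keys i
      rw [ih lo mid (by omega), ih mid hi (by omega)]
      conv_rhs => rw [← Finset.sum_Ico_consecutive (fun i => bd keys i) h1 (le_of_lt h2),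
        Finset.sum_eq_sum_Ico_succ_bot h2 (fun i => bd keys i)]
      simp only [bd]
      ring

theorem foldl_ite_count {α : Type} (l : List α) (p : α → Prop) [DecidablePred p] (a : Int) :
    l.foldl (fun acc x => if p x then acc + 1 else acc) a
      = a + (l.map (fun x => if p x then (1 : Int) else 0)).sum := by
  induction l generalizing a with
  | nil => simp
  | cons x t ih =>
    simp only [List.foldl_cons, List.map_cons, List.sum_cons, ih]
    split <;> ring

theorem pyRange_map_sum (f : Int → Int) :
    ∀ (n : Nat), ((PySem.List.pyRange 1 (n : Int) 1).map f).sum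
      = ∑ i ∈ Finset.Ico 1 n, f (i : Int) := by
  intro n
  induction n with
  | zero => rw [PySem.List.pyRange_one_eq_nil (by norm_num)]; simp
  | succ n ih =>
    by_cases h : n = 0
    · subst h
      rw [PySem.List.pyRange_one_eq_nil (by norm_num)]; simp
    · have hcast : ((n + 1 : Nat) : Int) = (n : Int) + 1 := by push_cast; ring
      rw [hcast, PySem.List.pyRange_one_succ_right (by omega)]
      rw [List.map_append, List.sum_append, ih]
      rw [Finset.sum_Ico_succ_top (by omega)]
      simp

-- each loop term of A equals the boundary indicator on the mapped key list
theorem term_eq_bd (segments : List (List (String × String))) (i : Nat)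
    (h1 : 1 ≤ i) (h2 : i < segments.length) :
    (if speakerKey (PySem.List.pyGetD segments (i : Int) []) ≠
        speakerKey (PySem.List.pyGetD segments ((i : Int) - 1) []) then (1 : Int) else 0)
      = bd (segments.map speakerKey) i := by
  have e1 : PySem.List.pyGetD segments (i : Int) [] = segments[i] := by
    rw [PySem.List.pyGetD_eq_getElem segments [] (by omega) (by omega)]
    simp
  have e2 : PySem.List.pyGetD segments ((i : Int) - 1) [] = segments[i - 1] := by
    rw [PySem.List.pyGetD_eq_getElem segments [] (by omega) (by omega)]
    congr 1
    omega
  have g1 : (segments.map speakerKey).getD i none = speakerKey segments[i] := by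
    rw [List.getD_eq_getElem _ _ (by simpa using h2)]
    simp
  have g2 : (segments.map speakerKey).getD (i - 1) none = speakerKey segments[i - 1] := by
    rw [List.getD_eq_getElem _ _ (by simp; omega)]
    simp
  rw [e1, e2]
  show _ = bd (segments.map speakerKey) i
  rw [bd, g1, g2]
  by_cases hne : speakerKey segments[i - 1] = speakerKey segments[i]
  · rw [if_neg (not_not_intro hne.symm), if_neg (not_not_intro hne)]
  · rw [if_pos (fun h => hne h.symm), if_pos hne]

-- ===== VERDICT (by name: the statement is the Claim_ definition above) =====
theorem count_speaker_switches_py_spec : Claim_equal_count_speaker_switches_py := by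
  intro segments _
  unfold Spec_count_speaker_switches_py count_speaker_switches_py count_speaker_switches_py_alt
  have hB : switchesIn (segments.map speakerKey) 0 (segments.map speakerKey).length
      = ∑ i ∈ Finset.Ico 1 segments.length, bd (segments.map speakerKey) i := by
    rw [switchesIn_eq_sum (segments.map speakerKey) segments.length 0
        (segments.map speakerKey).length (by simp)]
    simp
  by_cases h : segments.length < 2
  · rw [if_pos h]
    simp only [hB]
    rw [Finset.Ico_eq_empty (by omega), Finset.sum_empty]
  · rw [if_neg h]
    rw [foldl_ite_count, zero_add, pyRange_map_sum _ segments.length]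
    simp only [hB]
    exact Finset.sum_congr rfl (fun i hi => by
      have := Finset.mem_Ico.mp hi
      exact term_eq_bd segments i this.1 this.2)
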